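-- pv_equiv track=rewrite | github.com/gmork2/browser_automation | browser_automation/utils/json.py | find_json_objects
-- ===== SOURCE A (Python) =====
-- def find_json_objects(s):
--     """
--     Find json objects in a string and returns a list of tuples containing start and
--     end locations of json objects in the string `s`
--     """
--     objects = []
--     opens = 0
--     start = s.find('{')
--     offset = start
--
--     if start < 0: return []
--
--     for index, c in enumerate(s[offset:]):
--         if c == '{':
--             opens += 1
--         elif c == '}':
--             opens -= 1
--             if opens == 0:
--                 objects.append((start, index + offset + 1))
--                 start = index + offset + 1
--     return objects
-- ===== SOURCE B (Python) =====
-- def find_json_objects(s):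
--     first = s.find('{')
--     if first < 0:
--         return []
--     tail = s[first:]
--     counts = []
--     o = c = 0
--     for ch in tail:
--         o += (ch == '{')
--         c += (ch == '}')
--         counts.append((o, c))
--     ends = [first + i + 1
--             for i, (ch, (o, c)) in enumerate(zip(tail, counts))
--             if ch == '}' and o == c]
--     return list(zip([first] + ends[:-1], ends))
-- ===== Notes on version B (the rewrite author's own statement) =====
-- stated objective: alternative
-- what changed: B replaces A's single stateful scan (depth counter, mutable start, tuples appended in the loop) by a staged pipeline: build a cumulative table of separate '{' and '}' counts, then declaratively select as ends the '}' positions whose prefix has equal counts, then zip [first]+ends[:-1] with ends.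
import Mathlib
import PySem

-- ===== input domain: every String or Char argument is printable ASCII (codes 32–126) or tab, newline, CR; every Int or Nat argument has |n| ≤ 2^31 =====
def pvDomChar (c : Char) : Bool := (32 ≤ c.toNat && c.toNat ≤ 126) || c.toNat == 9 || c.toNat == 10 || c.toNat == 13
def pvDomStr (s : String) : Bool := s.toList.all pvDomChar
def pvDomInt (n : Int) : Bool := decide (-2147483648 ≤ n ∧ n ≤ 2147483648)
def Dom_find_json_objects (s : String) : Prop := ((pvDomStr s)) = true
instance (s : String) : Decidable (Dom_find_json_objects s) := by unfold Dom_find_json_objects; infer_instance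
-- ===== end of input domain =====

-- B replaces A's stateful depth-counting scan by three stages: build a cumulative table of
-- '{'/'}' counts, select ends declaratively (a '}' whose prefix has equal counts), zip pairs
-- afterwards (objective: alternative decomposition, same O(n) cost).


-- ===== PORT A =====
-- A's for-loop over enumerate(s[offset:]): `index` is the enumerate counter, `offset`/`start`/
-- `opens`/`objects` the Python variables; s[offset:] with offset = s.find('{') ≥ 0 is exactly
-- s.toList.drop offset.toNat.
def aGo (l : List Char) (index offset opens start : Int)
    (objects : List (Int × Int)) : List (Int × Int) :=
  match l with
  | [] => objects
  | c :: rest =>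
    if c = '{' then aGo rest (index + 1) offset (opens + 1) start objects
    else if c = '}' then
      if opens - 1 = 0 then
        aGo rest (index + 1) offset (opens - 1) (index + offset + 1)
          (objects ++ [(start, index + offset + 1)])
      else aGo rest (index + 1) offset (opens - 1) start objects
    else aGo rest (index + 1) offset opens start objects

def find_json_objects (s : String) : List (Int × Int) :=
  let start := PySem.Str.find s "{"
  if start < 0 then []
  else aGo (s.toList.drop start.toNat) 0 start 0 start []

-- ===== PORT B =====
-- B's table-building loop: `counts.append((o, c))` with o/c the running counts of '{' and '}';
-- the Python list of pairs is built back-to-front by this structural recursion.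
def bCounts (l : List Char) (o c : Int) : List (Int × Int) :=
  match l with
  | [] => []
  | ch :: rest =>
    let o' := o + (if ch = '{' then 1 else 0)
    let c' := c + (if ch = '}' then 1 else 0)
    (o', c') :: bCounts rest o' c'

-- s[first:] with first = s.find('{') ≥ 0 is exactly s.toList.drop first.toNat; the comprehension
-- over enumerate(zip(tail, counts)) is the filterMap below; list(zip(..)) is List.zip.
def find_json_objects_alt (s : String) : List (Int × Int) :=
  let first := PySem.Str.find s "{"
  if first < 0 then []
  else
    let tail := s.toList.drop first.toNat
    let ends := (PySem.List.enumerate (tail.zip (bCounts tail 0 0))).filterMap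
      (fun p => if p.2.1 = '}' ∧ p.2.2.1 = p.2.2.2 then some (first + p.1 + 1) else none)
    (first :: ends.dropLast).zip ends

-- ===== PRECONDITION & SPEC =====
def Spec_find_json_objects (s : String) (out : List (Int × Int)) : Prop := out = find_json_objects_alt s
instance (s : String) (out : List (Int × Int)) : Decidable (Spec_find_json_objects s out) := by unfold Spec_find_json_objects; infer_instance

-- ===== CLAIM =====
def Claim_equal_find_json_objects : Prop := ∀ (s : String), Dom_find_json_objects s → Spec_find_json_objects s (find_json_objects s)

-- ===== LEMMAS AND PROOFS =====

-- B's ends, as a recursion carrying the absolute position k and the two running counts.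
def bE (l : List Char) (k o c : Int) : List Int :=
  match l with
  | [] => []
  | ch :: rest =>
    let o' := o + (if ch = '{' then 1 else 0)
    let c' := c + (if ch = '}' then 1 else 0)
    if ch = '}' ∧ o' = c' then (k + 1) :: bE rest (k + 1) o' c'
    else bE rest (k + 1) o' c'

lemma filterMap_enum_eq_bE (l : List Char) (d : Int) : ∀ (k o c : Int),
    (PySem.List.enumerate (l.zip (bCounts l o c)) k).filterMap
      (fun p => if p.2.1 = '}' ∧ p.2.2.1 = p.2.2.2 then some (d + p.1 + 1) else none)
      = bE l (d + k) o c := by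
  induction l with
  | nil => intro k o c; simp [bCounts, bE]
  | cons ch rest ih =>
    intro k o c
    simp only [bCounts, bE, List.zip_cons_cons, PySem.List.enumerate_cons, List.filterMap_cons]
    have e : d + (k + 1) = d + k + 1 := by ring
    split_ifs with h <;> simp_all [ih, e]

lemma zip_dropLast_cons (x : Int) (E : List Int) :
    ((x :: E).dropLast).zip E = (x :: E.dropLast).zip E := by
  cases E <;> simp [List.zip]

lemma aGo_eq_bE (l : List Char) : ∀ (index offset o c start : Int)
    (objects : List (Int × Int)),
    aGo l index offset (o - c) start objects =
      objects ++ (start :: (bE l (index + offset) o c).dropLast).zip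
        (bE l (index + offset) o c) := by
  induction l with
  | nil => intro _ _ _ _ _ _; simp [aGo, bE]
  | cons ch rest ih =>
    intro index offset o c start objects
    have e : index + 1 + offset = index + offset + 1 := by ring
    by_cases h1 : ch = '{'
    · subst h1
      rw [aGo, bE]
      have hf : ('{' : Char) = '}' ↔ False := by decide
      norm_num [hf]
      rw [show o - c + 1 = (o + 1) - c by ring, ih, e]
    · by_cases h2 : ch = '}'
      · subst h2
        rw [aGo, bE]
        norm_num [h1]
        by_cases h3 : o = c + 1
        · have h4 : o - c - 1 = 0 := by omega
          rw [if_pos h4, if_pos h3, show o - c - 1 = o - (c + 1) by ring, ih, e,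
            List.zip_cons_cons, zip_dropLast_cons, List.append_assoc,
            List.singleton_append]
        · have h4 : ¬ o - c - 1 = 0 := by omega
          rw [if_neg h4, if_neg h3, show o - c - 1 = o - (c + 1) by ring, ih, e]
      · rw [aGo, bE, if_neg h1]
        norm_num [h1, h2]
        rw [ih, e]

-- ===== VERDICT =====
theorem find_json_objects_spec : Claim_equal_find_json_objects := by
  intro s _
  unfold Spec_find_json_objects find_json_objects find_json_objects_alt
  by_cases h : PySem.Str.find s "{" < 0
  · rw [if_pos h, if_pos h]
  · rw [if_neg h, if_neg h]
    have hfm := filterMap_enum_eq_bE (s.toList.drop (PySem.Str.find s "{").toNat)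
      (PySem.Str.find s "{") 0 0 0
    rw [add_zero] at hfm
    dsimp only
    rw [hfm]
    have := aGo_eq_bE (s.toList.drop (PySem.Str.find s "{").toNat)
      0 (PySem.Str.find s "{") 0 0 (PySem.Str.find s "{") []
    simpa using this
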